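-- pv_equiv track=rewrite | github.com/Gniewkoss/image-recognition | backend/server.py | ingredients_match
-- ===== SOURCE A (Python) =====
-- INGREDIENT_SYNONYMS = {
--     "egg": ["eggs", "egg"],
--     "eggs": ["eggs", "egg"],
--     "cheese": ["cheese", "cheddar", "mozzarella", "parmesan", "swiss"],
--     "bread": ["bread", "toast", "sliced bread", "white bread", "wheat bread"],
--     "milk": ["milk", "whole milk", "skim milk"],
--     "butter": ["butter", "unsalted butter", "salted butter"],
--     "chicken": ["chicken", "chicken breast", "chicken thigh", "chicken leg"],
--     "tomato": ["tomato", "tomatoes", "cherry tomatoes"],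
--     "lettuce": ["lettuce", "romaine", "iceberg", "salad greens"],
--     "onion": ["onion", "onions", "yellow onion", "red onion"],
--     "garlic": ["garlic", "garlic cloves"],
--     "pasta": ["pasta", "spaghetti", "penne", "macaroni", "noodles"],
--     "rice": ["rice", "white rice", "brown rice", "cooked rice"],
--     "ham": ["ham", "sliced ham", "deli ham"],
--     "bacon": ["bacon", "bacon strips"],
--     "banana": ["banana", "bananas"],
--     "apple": ["apple", "apples"],
--     "yogurt": ["yogurt", "greek yogurt", "plain yogurt"],
--     "oil": ["oil", "olive oil", "vegetable oil", "cooking oil"],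
-- }
--
-- def normalize_ingredient(name):
--     """Normalize ingredient name for better matching."""
--     name = name.lower().strip()
--     remove_words = ['fresh', 'raw', 'cooked', 'dried', 'frozen', 'canned', 'sliced', 'diced', 'chopped', 'minced', 'whole', 'large', 'small', 'medium', 'organic']
--     words = name.split()
--     words = [w for w in words if w not in remove_words]
--     return ' '.join(words) if words else name
--
-- def ingredients_match(recipe_ing, user_ingredients):
--     """Check if a recipe ingredient matches any user ingredient."""
--     recipe_ing_norm = normalize_ingredient(recipe_ing)
--     recipe_words = set(recipe_ing_norm.split())
--
--     for user_ing in user_ingredients: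
--         user_norm = normalize_ingredient(user_ing['name'])
--         user_words = set(user_norm.split())
--
--         if recipe_ing_norm == user_norm:
--             return True
--         if recipe_words & user_words:
--             return True
--
--         for key, synonyms in INGREDIENT_SYNONYMS.items():
--             if recipe_ing_norm in synonyms or any(w in synonyms for w in recipe_words):
--                 if user_norm in synonyms or any(w in synonyms for w in user_words):
--                     return True
--
--     return False
-- ===== SOURCE B (Python) =====
-- INGREDIENT_SYNONYMS = {
--     "egg": ["eggs", "egg"],
--     "eggs": ["eggs", "egg"],
--     "cheese": ["cheese", "cheddar", "mozzarella", "parmesan", "swiss"],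
--     "bread": ["bread", "toast", "sliced bread", "white bread", "wheat bread"],
--     "milk": ["milk", "whole milk", "skim milk"],
--     "butter": ["butter", "unsalted butter", "salted butter"],
--     "chicken": ["chicken", "chicken breast", "chicken thigh", "chicken leg"],
--     "tomato": ["tomato", "tomatoes", "cherry tomatoes"],
--     "lettuce": ["lettuce", "romaine", "iceberg", "salad greens"],
--     "onion": ["onion", "onions", "yellow onion", "red onion"],
--     "garlic": ["garlic", "garlic cloves"],
--     "pasta": ["pasta", "spaghetti", "penne", "macaroni", "noodles"],
--     "rice": ["rice", "white rice", "brown rice", "cooked rice"],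
--     "ham": ["ham", "sliced ham", "deli ham"],
--     "bacon": ["bacon", "bacon strips"],
--     "banana": ["banana", "bananas"],
--     "apple": ["apple", "apples"],
--     "yogurt": ["yogurt", "greek yogurt", "plain yogurt"],
--     "oil": ["oil", "olive oil", "vegetable oil", "cooking oil"],
-- }
--
-- def normalize_ingredient(name):
--     """Normalize ingredient name for better matching."""
--     name = name.lower().strip()
--     remove_words = ['fresh', 'raw', 'cooked', 'dried', 'frozen', 'canned', 'sliced', 'diced', 'chopped', 'minced', 'whole', 'large', 'small', 'medium', 'organic']
--     words = name.split()
--     words = [w for w in words if w not in remove_words]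
--     return ' '.join(words) if words else name
--
-- def ingredients_match(recipe_ing, user_ingredients):
--     """Check if a recipe ingredient matches any user ingredient."""
--     recipe_ing_norm = normalize_ingredient(recipe_ing)
--     recipe_words = set(recipe_ing_norm.split())
--
--     # Precompute once the union of every synonym group the recipe matches.
--     recipe_groups = set()
--     for synonyms in INGREDIENT_SYNONYMS.values():
--         if recipe_ing_norm in synonyms or any(w in synonyms for w in recipe_words):
--             recipe_groups.update(synonyms)
--
--     for user_ing in user_ingredients:
--         user_norm = normalize_ingredient(user_ing['name'])
--         user_words = set(user_norm.split())
--         if (recipe_ing_norm == user_norm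
--                 or recipe_words & user_words
--                 or user_norm in recipe_groups
--                 or user_words & recipe_groups):
--             return True
--     return False
-- ===== Notes on version B (the rewrite author's own statement) =====
-- stated objective: faster
-- what changed: B precomputes once the set of all synonym words of every group the recipe matches, so the per-user inner scan over all 19 synonym groups is replaced by two flat set-membership tests inside a single pass over user_ingredients.
import Mathlib
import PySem

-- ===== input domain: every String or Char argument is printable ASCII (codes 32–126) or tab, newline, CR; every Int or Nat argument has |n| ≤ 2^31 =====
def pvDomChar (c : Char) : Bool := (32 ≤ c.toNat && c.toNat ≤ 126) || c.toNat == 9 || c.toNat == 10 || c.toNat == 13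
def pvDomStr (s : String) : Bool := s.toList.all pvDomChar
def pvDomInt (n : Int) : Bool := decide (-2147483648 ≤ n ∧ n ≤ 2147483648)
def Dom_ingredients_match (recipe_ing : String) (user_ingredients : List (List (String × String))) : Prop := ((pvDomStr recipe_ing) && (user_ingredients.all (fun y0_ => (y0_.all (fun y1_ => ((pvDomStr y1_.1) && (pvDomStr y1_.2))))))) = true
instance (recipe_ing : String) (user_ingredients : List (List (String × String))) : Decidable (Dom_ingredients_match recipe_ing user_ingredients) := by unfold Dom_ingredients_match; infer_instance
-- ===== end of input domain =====

-- B replaces A's per-user inner scan over all synonym groups with a set of all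
-- synonym words of the groups the recipe matches, built once before the user loop
-- (objective: simpler/faster per-user test; equivalence is on return values only).

-- ===== PORT A =====
def pvSynonyms : List (String × List String) := [
  ("egg", ["eggs", "egg"]),
  ("eggs", ["eggs", "egg"]),
  ("cheese", ["cheese", "cheddar", "mozzarella", "parmesan", "swiss"]),
  ("bread", ["bread", "toast", "sliced bread", "white bread", "wheat bread"]),
  ("milk", ["milk", "whole milk", "skim milk"]),
  ("butter", ["butter", "unsalted butter", "salted butter"]),
  ("chicken", ["chicken", "chicken breast", "chicken thigh", "chicken leg"]),
  ("tomato", ["tomato", "tomatoes", "cherry tomatoes"]),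
  ("lettuce", ["lettuce", "romaine", "iceberg", "salad greens"]),
  ("onion", ["onion", "onions", "yellow onion", "red onion"]),
  ("garlic", ["garlic", "garlic cloves"]),
  ("pasta", ["pasta", "spaghetti", "penne", "macaroni", "noodles"]),
  ("rice", ["rice", "white rice", "brown rice", "cooked rice"]),
  ("ham", ["ham", "sliced ham", "deli ham"]),
  ("bacon", ["bacon", "bacon strips"]),
  ("banana", ["banana", "bananas"]),
  ("apple", ["apple", "apples"]),
  ("yogurt", ["yogurt", "greek yogurt", "plain yogurt"]),
  ("oil", ["oil", "olive oil", "vegetable oil", "cooking oil"])]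

def pvRemoveWords : List String := ["fresh", "raw", "cooked", "dried", "frozen", "canned", "sliced", "diced", "chopped", "minced", "whole", "large", "small", "medium", "organic"]

def pvNormalize (name : String) : String :=
  let name := PySem.Str.strip (PySem.Str.lower name)
  let words := PySem.Str.split₀ name
  let words := words.filter (fun w => !(pvRemoveWords.contains w))
  if !words.isEmpty then PySem.Str.join " " words else name

-- A's inner 'for key, synonyms in INGREDIENT_SYNONYMS.items()' loop with early return
def pvSynLoop (rn : String) (rw : PySem.Set String) (un : String) (uw : PySem.Set String) : List (String × List String) → Bool
  | [] => false
  | (_, syns) :: rest =>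
    if (syns.contains rn || rw.any (fun w => syns.contains w)) &&
       (syns.contains un || uw.any (fun w => syns.contains w)) then true
    else pvSynLoop rn rw un uw rest

-- A's 'for user_ing in user_ingredients' loop with early returns
def pvALoop (rn : String) (rw : PySem.Set String) : List (List (String × String)) → Bool
  | [] => false
  | u :: rest =>
    let un := pvNormalize (PySem.Dict.getD (PySem.Dict.mk u) "name" "")
    let uw : PySem.Set String := PySem.Set.ofList (PySem.Str.split₀ un)
    if rn == un then true
    else if !(PySem.Set.inter rw uw).isEmpty then true
    else if pvSynLoop rn rw un uw pvSynonyms then true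
    else pvALoop rn rw rest

def ingredients_match (recipe_ing : String) (user_ingredients : List (List (String × String))) : Bool :=
  let rn := pvNormalize recipe_ing
  let rw : PySem.Set String := PySem.Set.ofList (PySem.Str.split₀ rn)
  pvALoop rn rw user_ingredients

-- ===== PORT B =====
-- union of every synonym group the recipe matches, built once
def pvRecipeGroups (rn : String) (rw : PySem.Set String) : PySem.Set String :=
  pvSynonyms.foldl (fun acc p =>
    if p.2.contains rn || rw.any (fun w => p.2.contains w)
    then PySem.Set.update acc p.2 else acc) PySem.Set.empty

def pvBLoop (rn : String) (rw : PySem.Set String) (rg : PySem.Set String) : List (List (String × String)) → Bool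
  | [] => false
  | u :: rest =>
    let un := pvNormalize (PySem.Dict.getD (PySem.Dict.mk u) "name" "")
    let uw : PySem.Set String := PySem.Set.ofList (PySem.Str.split₀ un)
    if rn == un || !(PySem.Set.inter rw uw).isEmpty
       || rg.contains un || !(PySem.Set.inter uw rg).isEmpty then true
    else pvBLoop rn rw rg rest

def ingredients_match_alt (recipe_ing : String) (user_ingredients : List (List (String × String))) : Bool :=
  let rn := pvNormalize recipe_ing
  let rw : PySem.Set String := PySem.Set.ofList (PySem.Str.split₀ rn)
  pvBLoop rn rw (pvRecipeGroups rn rw) user_ingredients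

-- ===== PRECONDITION & SPEC =====
-- Pre_ excludes user-ingredient dicts without a "name" key, on which the Python A raises KeyError.
def Pre_ingredients_match (recipe_ing : String) (user_ingredients : List (List (String × String))) : Prop :=
  ∀ u ∈ user_ingredients, PySem.Dict.contains (PySem.Dict.mk u) "name" = true
instance (recipe_ing : String) (user_ingredients : List (List (String × String))) : Decidable (Pre_ingredients_match recipe_ing user_ingredients) := by unfold Pre_ingredients_match; infer_instance

def pvWitness_ingredients_match : String × (List (List (String × String))) := ("Fresh Eggs", [[("name", "milk")], [("name", "egg")]])

def Spec_ingredients_match (recipe_ing : String) (user_ingredients : List (List (String × String))) (out : Bool) : Prop := out = ingredients_match_alt recipe_ing user_ingredients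
instance (recipe_ing : String) (user_ingredients : List (List (String × String))) (out : Bool) : Decidable (Spec_ingredients_match recipe_ing user_ingredients out) := by unfold Spec_ingredients_match; infer_instance

-- ===== CLAIM (what is proved, stated in full; the proofs are below) =====
def Claim_equal_ingredients_match : Prop := ∀ (recipe_ing : String) (user_ingredients : List (List (String × String))), Dom_ingredients_match recipe_ing user_ingredients → Pre_ingredients_match recipe_ing user_ingredients → Spec_ingredients_match recipe_ing user_ingredients (ingredients_match recipe_ing user_ingredients)

-- ===== LEMMAS AND PROOFS =====


-- membership in a foldl of conditional Set.update
theorem mem_foldl_update (gs : List (String × List String)) (acc : PySem.Set String)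
    (cond : List String → Bool) (x : String) :
    x ∈ gs.foldl (fun a p => if cond p.2 then PySem.Set.update a p.2 else a) acc ↔
      x ∈ acc ∨ ∃ p ∈ gs, cond p.2 = true ∧ x ∈ p.2 := by
  induction gs generalizing acc with
  | nil => simp
  | cons hd tl ih =>
    simp only [List.foldl_cons]
    by_cases h : cond hd.2 = true
    · simp only [h, if_true, ih, PySem.Set.mem_update, List.mem_cons]
      constructor
      · rintro ((hx | hx) | ⟨p, hp, hc, hm⟩)
        · exact Or.inl hx
        · exact Or.inr ⟨hd, Or.inl rfl, h, hx⟩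
        · exact Or.inr ⟨p, Or.inr hp, hc, hm⟩
      · rintro (hx | ⟨p, hp | hp, hc, hm⟩)
        · exact Or.inl (Or.inl hx)
        · subst hp; exact Or.inl (Or.inr hm)
        · exact Or.inr ⟨p, hp, hc, hm⟩
    · simp only [h, ih, List.mem_cons]
      constructor
      · rintro (hx | ⟨p, hp, hc, hm⟩)
        · exact Or.inl hx
        · exact Or.inr ⟨p, Or.inr hp, hc, hm⟩
      · rintro (hx | ⟨p, hp | hp, hc, hm⟩)
        · exact Or.inl hx
        · subst hp; exact absurd hc h
        · exact Or.inr ⟨p, hp, hc, hm⟩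

-- membership in the pre-built union of matched groups
theorem mem_pvRecipeGroups (rn : String) (rw : PySem.Set String) (x : String) :
    x ∈ pvRecipeGroups rn rw ↔
      ∃ p ∈ pvSynonyms, (p.2.contains rn || rw.any (fun w => p.2.contains w)) = true ∧ x ∈ p.2 := by
  have := mem_foldl_update pvSynonyms PySem.Set.empty
    (fun s => s.contains rn || rw.any (fun w => s.contains w)) x
  simpa [pvRecipeGroups, PySem.Set.empty] using this

theorem pvSynLoop_iff (rn : String) (rw : PySem.Set String) (un : String) (uw : PySem.Set String)
    (gs : List (String × List String)) :
    pvSynLoop rn rw un uw gs = true ↔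
      ∃ p ∈ gs, ((p.2.contains rn || rw.any (fun w => p.2.contains w)) = true ∧
                 (p.2.contains un || uw.any (fun w => p.2.contains w)) = true) := by
  induction gs with
  | nil => simp [pvSynLoop]
  | cons hd tl ih =>
    obtain ⟨k, syns⟩ := hd
    simp only [pvSynLoop]
    split_ifs with h
    · simp only [Bool.and_eq_true] at h
      simp only [List.mem_cons, true_iff]
      exact ⟨(k, syns), Or.inl rfl, h.1, h.2⟩
    · simp only [Bool.and_eq_true] at h
      simp only [ih, List.mem_cons]
      constructor
      · rintro ⟨p, hp, h1, h2⟩; exact ⟨p, Or.inr hp, h1, h2⟩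
      · rintro ⟨p, hp | hp, h1, h2⟩
        · subst hp; exact absurd ⟨h1, h2⟩ h
        · exact ⟨p, hp, h1, h2⟩

-- the per-user synonym scan equals the flat membership tests against the union
theorem pvSynLoop_eq (rn : String) (rw : PySem.Set String) (un : String) (uw : PySem.Set String) :
    pvSynLoop rn rw un uw pvSynonyms =
      ((pvRecipeGroups rn rw).contains un || !(PySem.Set.inter uw (pvRecipeGroups rn rw)).isEmpty) := by
  have hA := pvSynLoop_iff rn rw un uw pvSynonyms
  rw [Bool.eq_iff_iff, hA]
  have hc : ((pvRecipeGroups rn rw).contains un = true) ↔ un ∈ pvRecipeGroups rn rw :=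
    List.contains_iff_mem
  have hi : ((!(PySem.Set.inter uw (pvRecipeGroups rn rw)).isEmpty) = true) ↔
      ∃ w ∈ uw, w ∈ pvRecipeGroups rn rw := by
    rw [Bool.not_eq_eq_eq_not, Bool.not_true, List.isEmpty_eq_false_iff_exists_mem]
    constructor
    · rintro ⟨w, hw⟩; rw [PySem.Set.mem_inter] at hw; exact ⟨w, hw⟩
    · rintro ⟨w, h1, h2⟩; exact ⟨w, by rw [PySem.Set.mem_inter]; exact ⟨h1, h2⟩⟩
  rw [Bool.or_eq_true, hc, hi]
  simp only [mem_pvRecipeGroups]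
  constructor
  · rintro ⟨p, hp, hr, hu⟩
    rcases Bool.or_eq_true _ _ |>.mp hu with hc1 | hc2
    · exact Or.inl ⟨p, hp, hr, List.contains_iff_mem.mp hc1⟩
    · obtain ⟨w, hw, hw2⟩ := List.any_eq_true.mp hc2
      exact Or.inr ⟨w, hw, p, hp, hr, List.contains_iff_mem.mp hw2⟩
  · rintro (⟨p, hp, hr, hcm⟩ | ⟨w, hw, p, hp, hr, hw2⟩)
    · exact ⟨p, hp, hr, Bool.or_eq_true _ _ |>.mpr (Or.inl (List.contains_iff_mem.mpr hcm))⟩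
    · exact ⟨p, hp, hr, Bool.or_eq_true _ _ |>.mpr
        (Or.inr (List.any_eq_true.mpr ⟨w, hw, List.contains_iff_mem.mpr hw2⟩))⟩

theorem pvALoop_eq_pvBLoop (rn : String) (rw : PySem.Set String) (l : List (List (String × String))) :
    pvALoop rn rw l = pvBLoop rn rw (pvRecipeGroups rn rw) l := by
  induction l with
  | nil => rfl
  | cons u rest ih =>
    simp only [pvALoop, pvBLoop, pvSynLoop_eq]
    set un := pvNormalize (PySem.Dict.getD (PySem.Dict.mk u) "name" "")
    set uw : PySem.Set String := PySem.Set.ofList (PySem.Str.split₀ un)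
    cases h1 : (rn == un) <;>
      cases h2 : (PySem.Set.inter rw uw).isEmpty <;>
      cases h3 : (pvRecipeGroups rn rw).contains un <;>
      cases h4 : (PySem.Set.inter uw (pvRecipeGroups rn rw)).isEmpty <;>
      simp [h1, h2, h3, h4, ih]

-- ===== VERDICT (by name: the statement is the Claim_ definition above) =====
theorem ingredients_match_spec : Claim_equal_ingredients_match := by
  intro r ui _ _
  unfold Spec_ingredients_match ingredients_match ingredients_match_alt
  exact pvALoop_eq_pvBLoop _ _ ui
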